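-- pv_equiv track=rewrite | github.com/allentran/tennis-parser | parser.py | segment_string
-- ===== SOURCE A (Python) =====
-- from typing import List
--
-- def segment_string(s: str) -> List[str]:
--     shot_strs = []  # List[str]
--     start_pos = 0
--     curr_shot_str = ''
--     for curr_pos in range(len(s)):
--         c = s[curr_pos]
--         if curr_pos == 0:
--             continue
--         else:
--             if c in {4, 5, 6}:  # serve
--                 curr_shot_str = c
--             elif c in {'@', '#', '*'}:  # current point is terminal
--                 curr_shot_str += c
--             elif c in {'f', 'b', 's', 'r', 'v', 'l', 'o', 'm'}:  #
--                 shot_strs.append(s[start_pos: curr_pos])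
--                 start_pos = curr_pos
--                 curr_shot_str = c
--             elif c in {'1', '2', '3'}:  # direction annotation
--                 curr_shot_str += c
--             elif c in {'n', 'w', 'd', 'x'}:  # error annotation
--                 curr_shot_str += c
--             elif c in {'7', '8', '9'}:  # return depth annotation
--                 curr_shot_str += c
--             elif c in {'+', '-', '='}:  # court position annotation
--                 curr_shot_str += c
--     else:
--         shot_strs.append(s[start_pos:])
--
--     return shot_strs
-- ===== SOURCE B (Python) =====
-- from typing import List
--
-- def segment_string(s: str) -> List[str]:
--     # Repeatedly peel the head segment off the remaining suffix: find the next
--     # shot character (never the first char of the suffix), cut there, repeat.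
--     SHOT = frozenset('fbsrvlom')
--     out = []
--     rest = s
--     while True:
--         j = next((i for i in range(1, len(rest)) if rest[i] in SHOT), None)
--         if j is None:
--             out.append(rest)
--             return out
--         out.append(rest[:j])
--         rest = rest[j:]
-- ===== Notes on version B (the rewrite author's own statement) =====
-- stated objective: alternative
-- what changed: Replaces A's character-at-a-time state machine over global indices (start_pos plus a dead curr_shot_str carried through a 7-branch loop body) with a peeling loop that repeatedly finds the next shot character in the remaining suffix and cuts the head segment off it.
import Mathlib
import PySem

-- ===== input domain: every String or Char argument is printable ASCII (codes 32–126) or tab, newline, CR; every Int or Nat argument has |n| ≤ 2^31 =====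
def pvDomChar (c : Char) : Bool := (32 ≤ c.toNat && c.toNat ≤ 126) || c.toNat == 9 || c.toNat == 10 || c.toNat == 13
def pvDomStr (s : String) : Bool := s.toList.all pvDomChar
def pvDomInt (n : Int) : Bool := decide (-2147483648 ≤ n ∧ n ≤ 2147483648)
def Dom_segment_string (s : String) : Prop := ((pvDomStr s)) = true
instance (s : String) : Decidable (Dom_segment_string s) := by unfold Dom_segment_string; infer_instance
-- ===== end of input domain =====

-- B peels the head segment off the remaining suffix with a find-next-boundary-and-cut loop,
-- instead of A's character-at-a-time state machine over global indices (same cost, different shape).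

-- ===== PORT A =====
def shotChars : List Char := ['f', 'b', 's', 'r', 'v', 'l', 'o', 'm']

-- one iteration of A's loop body; state = (shot_strs, start_pos, curr_shot_str)
def segAstep (cs : List Char) (st : List String × Nat × List Char) (i : Nat) :
    List String × Nat × List Char :=
  let (shots, start, curr) := st
  let c := PySem.List.pyGetD cs (i : Int) ' '
  if i = 0 then st                                   -- continue
  -- Python's first branch 'c in {4, 5, 6}' compares a 1-char str with ints: always False
  else if c ∈ (['@', '#', '*'] : List Char) then (shots, start, curr ++ [c])
  else if c ∈ shotChars then
    (shots ++ [String.ofList (PySem.List.slice cs (some (start : Int)) (some (i : Int)))],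
     i, [c])
  else if c ∈ (['1', '2', '3'] : List Char) then (shots, start, curr ++ [c])
  else if c ∈ (['n', 'w', 'd', 'x'] : List Char) then (shots, start, curr ++ [c])
  else if c ∈ (['7', '8', '9'] : List Char) then (shots, start, curr ++ [c])
  else if c ∈ (['+', '-', '='] : List Char) then (shots, start, curr ++ [c])
  else st

def segment_string (s : String) : List String :=
  let cs := s.toList
  let st := (List.range cs.length).foldl (segAstep cs) ([], 0, [])
  st.1 ++ [String.ofList (PySem.List.slice cs (some ((st.2.1 : Int))) none)]

-- ===== PORT B =====
-- Source B's inner search 'next((i for i in range(1, len(rest)) if rest[i] in SHOT), None)':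
-- first index ≥ 1 of the suffix whose character is a shot character
def segBfind (cs : List Char) : Option Nat :=
  (cs.tail.findIdx? (fun c => decide (c ∈ shotChars))).map (· + 1)

-- termination of the peeling loop: the found cut point is a proper, positive position
theorem segBfind_lt (cs : List Char) (j : Nat) (h : segBfind cs = some j) :
    0 < j ∧ j < cs.length := by
  unfold segBfind at h
  cases hh : cs.tail.findIdx? (fun c => decide (c ∈ shotChars)) with
  | none => rw [hh] at h; simp at h
  | some k =>
    rw [hh] at h
    simp only [Option.map_some, Option.some.injEq] at h
    rw [List.findIdx?_eq_some_iff_getElem] at hh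
    obtain ⟨hk, -⟩ := hh
    have := cs.length_tail
    omega

-- Source B's while-loop, one recursive step per peeled segment
-- (rest[:j] / rest[j:] with 0 ≤ j < len(rest) are exactly take/drop)
def segB (cs : List Char) : List (List Char) :=
  match h : segBfind cs with
  | none => [cs]
  | some j => cs.take j :: segB (cs.drop j)
termination_by cs.length
decreasing_by
  have := segBfind_lt cs j h
  simp only [List.length_drop]
  omega

def segment_string_alt (s : String) : List String :=
  (segB s.toList).map String.ofList

-- ===== PRECONDITION & SPEC =====
def Spec_segment_string (s : String) (out : List String) : Prop := out = segment_string_alt s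
instance (s : String) (out : List String) : Decidable (Spec_segment_string s out) := by unfold Spec_segment_string; infer_instance

-- ===== CLAIM (what is proved, stated in full; the proofs are below) =====
def Claim_equal_segment_string : Prop := ∀ (s : String), Dom_segment_string s → Spec_segment_string s (segment_string s)

-- ===== LEMMAS AND PROOFS =====

-- the boundary positions A's loop splits at, among indices < n
def segBounds (cs : List Char) (n : Nat) : List Nat :=
  0 :: (List.range n).filter
        (fun i => decide (i ≠ 0 ∧ PySem.List.pyGetD cs (i : Int) ' ' ∈ shotChars))

-- the slices-between-boundaries normal form both programs are reduced to
def boundsSpec (cs : List Char) : List String :=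
  List.zipWith
      (fun (a b : Nat) => String.ofList (PySem.List.slice cs (some (a : Int)) (some (b : Int))))
      (segBounds cs cs.length) (segBounds cs cs.length).tail
    ++ [String.ofList (PySem.List.slice cs (some ((segBounds cs cs.length).getLastD 0 : Int)) none)]

-- zipping a snoc'd list with its own tail appends one pair
theorem zipWith_tail_snoc {α β : Type} (f : α → α → β) (d m : α) :
    ∀ (bs : List α), bs ≠ [] →
      List.zipWith f (bs ++ [m]) (bs ++ [m]).tail
        = List.zipWith f bs bs.tail ++ [f (bs.getLastD d) m] := by
  intro bs
  induction bs with
  | nil => simp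
  | cons x t ih =>
    intro _
    cases t with
    | nil => simp
    | cons y u =>
      have := ih (by simp)
      simp only [List.cons_append, List.tail_cons, List.zipWith_cons_cons] at this ⊢
      rw [this]
      simp [List.getLastD]

-- A-side loop invariant: after processing indices < n, A's shot_strs are the slices between
-- consecutive boundaries among indices < n, and start_pos is the last such boundary
theorem segA_inv (cs : List Char) (n : Nat) :
    ((List.range n).foldl (segAstep cs) ([], 0, [])).1
        = List.zipWith
            (fun (a b : Nat) => String.ofList (PySem.List.slice cs (some (a : Int)) (some (b : Int))))
            (segBounds cs n) (segBounds cs n).tail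
      ∧ ((List.range n).foldl (segAstep cs) ([], 0, [])).2.1 = (segBounds cs n).getLastD 0 := by
  induction n with
  | zero => simp [segBounds]
  | succ n ih =>
    obtain ⟨ih1, ih2⟩ := ih
    rw [List.range_succ, List.foldl_append]
    have hb : segBounds cs (n + 1)
        = segBounds cs n
          ++ (if n ≠ 0 ∧ PySem.List.pyGetD cs (n : Int) ' ' ∈ shotChars then [n] else []) := by
      simp only [segBounds, List.range_succ, List.filter_append, List.filter_singleton]
      by_cases h : n ≠ 0 ∧ PySem.List.pyGetD cs (n : Int) ' ' ∈ shotChars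
      · have hd : decide (n ≠ 0 ∧ PySem.List.pyGetD cs (n : Int) ' ' ∈ shotChars) = true :=
          decide_eq_true h
        rw [if_pos h, hd, cond_true]
        simp
      · have hd : decide (n ≠ 0 ∧ PySem.List.pyGetD cs (n : Int) ' ' ∈ shotChars) = false :=
          decide_eq_false h
        rw [if_neg h, hd, cond_false]
        simp
    set st := (List.range n).foldl (segAstep cs) ([], 0, []) with hst
    obtain ⟨sh, sp, cu⟩ := st
    simp only at ih1 ih2
    subst ih1 ih2
    simp only [List.foldl_cons, List.foldl_nil, segAstep]
    by_cases h0 : n = 0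
    · subst h0
      simp [hb]
    · simp only [if_neg h0]
      by_cases hsh : PySem.List.pyGetD cs (n : Int) ' ' ∈ shotChars
      · have hterm : PySem.List.pyGetD cs (n : Int) ' ' ∉ (['@', '#', '*'] : List Char) := by
          intro hc
          have hsh' := hsh
          simp only [shotChars, List.mem_cons, List.not_mem_nil, or_false] at hsh'
          rcases hsh' with h|h|h|h|h|h|h|h <;> rw [h] at hc <;> simp at hc
        rw [hb, if_pos (And.intro h0 hsh)]
        have hne : segBounds cs n ≠ [] := by simp [segBounds]
        rw [zipWith_tail_snoc _ 0 n _ hne]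
        rw [if_neg hterm, if_pos hsh]
        exact ⟨rfl, by simp⟩
      · have hb' : segBounds cs (n + 1) = segBounds cs n := by
          rw [hb, if_neg (by tauto)]; simp
        rw [hb']
        split_ifs <;> simp_all

-- full characterisation of B's cut point: first shot-character position ≥ 1
theorem segBfind_some_facts (cs : List Char) (j : Nat) (h : segBfind cs = some j) :
    0 < j ∧ ∃ hj : j < cs.length, cs[j] ∈ shotChars ∧
      ∀ i, 0 < i → i < j → ∀ hi : i < cs.length, cs[i] ∉ shotChars := by
  unfold segBfind at h
  cases hh : cs.tail.findIdx? (fun c => decide (c ∈ shotChars)) with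
  | none => rw [hh] at h; simp at h
  | some k =>
    rw [hh] at h
    simp only [Option.map_some, Option.some.injEq] at h
    rw [List.findIdx?_eq_some_iff_getElem] at hh
    obtain ⟨hk, hpk, hmin⟩ := hh
    have hlt := cs.length_tail
    refine ⟨by omega, by omega, ?_, ?_⟩
    · have := List.getElem_tail (l := cs) (i := k) (h := hk)
      subst h
      simp only [decide_eq_true_eq] at hpk
      rwa [List.getElem_tail] at hpk
    · intro i hi0 hij hi
      have hk' : i - 1 < k := by omega
      have := hmin (i - 1) hk'
      simp only [decide_eq_true_eq] at this
      rw [List.getElem_tail] at this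
      have : cs[i - 1 + 1]'(by omega) ∉ shotChars := this
      simpa [Nat.sub_add_cancel hi0] using this

theorem segBfind_none_facts (cs : List Char) (h : segBfind cs = none) :
    ∀ i, 0 < i → ∀ hi : i < cs.length, cs[i] ∉ shotChars := by
  unfold segBfind at h
  rw [Option.map_eq_none_iff, List.findIdx?_eq_none_iff] at h
  intro i hi0 hi hmem
  have hit : i - 1 < cs.tail.length := by have := cs.length_tail; omega
  have := h (cs.tail[i - 1]) (List.getElem_mem hit)
  rw [List.getElem_tail] at this
  have h2 : cs[i - 1 + 1]'(by omega) ∈ shotChars := by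
    simpa [Nat.sub_add_cancel hi0] using hmem
  simp [h2] at this

-- indexing with an in-range natural index
theorem pyGetD_at (cs : List Char) (i : Nat) (h : i < cs.length) :
    PySem.List.pyGetD cs (i : Int) ' ' = cs[i] := by
  simp [PySem.List.pyGetD_natCast, List.getD_eq_getElem?_getD, h]

-- boundary list when there is no cut point
theorem bounds_none (cs : List Char) (h : segBfind cs = none) :
    segBounds cs cs.length = [0] := by
  unfold segBounds
  have hf : (List.range cs.length).filter
      (fun (i : Nat) => decide (i ≠ 0 ∧ PySem.List.pyGetD cs (i : Int) ' ' ∈ shotChars)) = [] := by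
    apply List.filter_eq_nil_iff.mpr
    intro i hi
    simp only [List.mem_range] at hi
    simp only [decide_eq_true_eq, not_and]
    intro hi0 hmem
    rw [pyGetD_at cs i hi] at hmem
    exact segBfind_none_facts cs h i (by omega) hi hmem
  rw [hf]

-- boundary list decomposes at the first cut point
theorem bounds_some (cs : List Char) (j : Nat) (h : segBfind cs = some j) :
    segBounds cs cs.length
      = 0 :: (segBounds (cs.drop j) (cs.drop j).length).map (· + j) := by
  obtain ⟨hj0, hjlen, hjshot, hmin⟩ := segBfind_some_facts cs j h
  have hdlen : (cs.drop j).length = cs.length - j := by simp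
  set m := cs.length - j with hm
  have hm0 : 0 < m := by omega
  unfold segBounds
  rw [hdlen]
  simp only [List.map_cons, List.cons.injEq, true_and]
  rw [show cs.length = j + m by omega, List.range_add, List.filter_append]
  have hleft : (List.range j).filter
      (fun (i : Nat) => decide (i ≠ 0 ∧ PySem.List.pyGetD cs (i : Int) ' ' ∈ shotChars)) = [] := by
    apply List.filter_eq_nil_iff.mpr
    intro i hi
    simp only [List.mem_range] at hi
    simp only [decide_eq_true_eq, not_and]
    intro hi0 hmem
    rw [pyGetD_at cs i (by omega)] at hmem
    exact hmin i (by omega) hi (by omega) hmem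
  rw [hleft, List.nil_append, List.filter_map]
  rw [show m = (m - 1) + 1 by omega, List.range_succ_eq_map]
  have hpj : (fun (i : Nat) => decide (i ≠ 0 ∧ PySem.List.pyGetD cs (i : Int) ' ' ∈ shotChars)) (j + 0)
      = true := by
    simp only [Nat.add_zero, decide_eq_true_eq]
    exact ⟨by omega, by rw [pyGetD_at cs j hjlen]; exact hjshot⟩
  rw [List.filter_cons_of_pos (by exact hpj), List.filter_cons_of_neg (by simp)]
  simp only [List.map_cons, List.cons.injEq]
  refine ⟨by omega, ?_⟩
  rw [List.filter_map, List.filter_map, List.map_map, List.map_map]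
  have hfil : (List.range (m - 1)).filter
        (((fun (i : Nat) => decide (i ≠ 0 ∧ PySem.List.pyGetD cs (i : Int) ' ' ∈ shotChars))
            ∘ fun x => j + x) ∘ Nat.succ)
      = (List.range (m - 1)).filter
        ((fun (i : Nat) => decide (i ≠ 0 ∧ PySem.List.pyGetD (cs.drop j) (i : Int) ' ' ∈ shotChars))
            ∘ Nat.succ) := by
    apply List.filter_congr
    intro i hi
    simp only [List.mem_range] at hi
    have h1 : j + (i + 1) < cs.length := by omega
    have h2 : i + 1 < (cs.drop j).length := by rw [hdlen]; omega
    simp only [Function.comp_apply, Nat.succ_eq_add_one]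
    rw [pyGetD_at cs (j + (i + 1)) h1, pyGetD_at (cs.drop j) (i + 1) h2, List.getElem_drop]
    simp only [decide_eq_decide]
    constructor
    · rintro ⟨-, hmem⟩; exact ⟨by omega, hmem⟩
    · rintro ⟨-, hmem⟩; exact ⟨by omega, hmem⟩
  rw [hfil]
  apply List.map_congr_left
  intro i _
  simp only [Function.comp_apply, Nat.succ_eq_add_one]
  omega

-- zipWith of a mapped list against its own tail
theorem zipAdjMap (f f' : Nat → Nat → String) (g : Nat → Nat)
    (hf : ∀ a b, f (g a) (g b) = f' a b) :
    ∀ l : List Nat, List.zipWith f (l.map g) (l.map g).tail = List.zipWith f' l l.tail := by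
  intro l
  induction l with
  | nil => simp
  | cons a t ih =>
    cases t with
    | nil => simp
    | cons b u =>
      simp only [List.map_cons, List.tail_cons, List.zipWith_cons_cons] at ih ⊢
      rw [hf, ih]

theorem getLastD_map_add (j : Nat) :
    ∀ (l : List Nat) (d : Nat), (l.map (· + j)).getLastD (d + j) = l.getLastD d + j := by
  intro l
  induction l with
  | nil => intro d; simp
  | cons a t ih => intro d; simp only [List.map_cons, List.getLastD_cons]; exact ih a

-- B's recursion produces exactly the slices-between-boundaries normal form
theorem segB_eq (cs : List Char) : (segB cs).map String.ofList = boundsSpec cs := by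
  induction cs using segB.induct with
  | case1 cs h =>
    rw [segB.eq_def, h]
    unfold boundsSpec
    rw [bounds_none cs h]
    simp [PySem.List.slice_none_none]
  | case2 cs j h ih =>
    rw [segB.eq_def, h]
    simp only [List.map_cons]
    rw [ih]
    unfold boundsSpec
    rw [bounds_some cs j h]
    obtain ⟨t, ht⟩ : ∃ t, segBounds (cs.drop j) (cs.drop j).length = 0 :: t := ⟨_, rfl⟩
    have hshift : ∀ a b : Nat,
        (fun (a b : Nat) => String.ofList (PySem.List.slice cs (some (a : Int)) (some (b : Int))))
          (a + j) (b + j)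
        = (fun (a b : Nat) =>
            String.ofList (PySem.List.slice (cs.drop j) (some (a : Int)) (some (b : Int)))) a b := by
      intro a b
      simp only [PySem.List.slice_natCast, List.drop_drop, Nat.add_comm]
      rw [show j + b - (j + a) = b - a from by omega]
    have hzip := zipAdjMap
      (fun (a b : Nat) => String.ofList (PySem.List.slice cs (some (a : Int)) (some (b : Int))))
      (fun (a b : Nat) => String.ofList (PySem.List.slice (cs.drop j) (some (a : Int)) (some (b : Int))))
      (· + j) hshift (segBounds (cs.drop j) (cs.drop j).length)
    rw [ht] at hzip ⊢
    simp only [List.map_cons, List.tail_cons, List.getLastD_cons]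
    rw [List.zipWith_cons_cons]
    simp only [List.map_cons, List.tail_cons] at hzip
    rw [hzip]
    have hlast : (t.map (· + j)).getLastD (0 + j) = t.getLastD 0 + j := getLastD_map_add j t 0
    simp only [Nat.zero_add] at hlast ⊢
    rw [hlast]
    have htake : String.ofList (PySem.List.slice cs (some ((0 : Nat) : Int)) (some ((j : Nat) : Int)))
        = String.ofList (cs.take j) := by
      simp
    have hlastslice : PySem.List.slice cs (some ((t.getLastD 0 + j : Nat) : Int)) none
        = PySem.List.slice (cs.drop j) (some ((t.getLastD 0 : Nat) : Int)) none := by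
      simp only [PySem.List.slice_from_natCast, List.drop_drop, Nat.add_comm]
    push_cast at htake hlastslice ⊢
    rw [htake, hlastslice]
    simp

-- ===== VERDICT (by name: the statement is the Claim_ definition above) =====
theorem segment_string_spec : Claim_equal_segment_string := by
  intro s _
  unfold Spec_segment_string
  show segment_string s = segment_string_alt s
  simp only [segment_string, segment_string_alt]
  obtain ⟨h1, h2⟩ := segA_inv s.toList s.toList.length
  rw [segB_eq]
  unfold boundsSpec
  rw [h1, h2]
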